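-- pv_equiv track=rewrite | github.com/Maljak10010111/Social-Network-graph-anonymization | dividing_nodes.py | divide_nodes
-- ===== SOURCE A (Python) =====
-- def safety_condition(c, v, E):
--     for w, z in E:
--         if (w in c and z in c) and (w != v and z != v):
--             return False
--     return True
--
-- def divide_nodes(V, m, E):
--     V.sort()
--     classes = []
--
--     for v in V:
--         flag = True
--         for c in classes:
--             if safety_condition(c, v, E) and len(c) < m:
--                 c.append(v)
--                 flag = False
--                 break
--         if flag:
--             new_class = [v]
--             classes.append(new_class)
--
--     return classes
-- ===== SOURCE B (Python) =====
-- def divide_nodes(V, m, E):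
--     # Note: like A, sorts V in place (same observable mutation of V).
--     V.sort()
--     entries = []  # per class: [members, member_value_set, internal_edges_of_the_class]
--     for v in V:
--         for entry in entries:
--             members, mset, internal = entry
--             if len(members) < m and all(w == v or z == v for (w, z) in internal):
--                 members.append(v)
--                 if v not in mset:
--                     mset.add(v)
--                     entry[2] = internal + [(w, z) for (w, z) in E
--                                            if (w == v and z in mset) or (z == v and w in mset)]
--                 break
--         else:
--             entries.append([[v], {v}, [(w, z) for (w, z) in E if w == v and z == v]])
--     return [entry[0] for entry in entries]
-- ===== Notes on version B (the rewrite author's own statement) =====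
-- stated objective: faster
-- what changed: Instead of rescanning the whole edge list E for every (node, class) safety check, B keeps for each class its member set and the list of its internal edges, updated incrementally when a node joins, so a safety check only scans that class's internal edges and E is scanned once per added node.
import Mathlib
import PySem

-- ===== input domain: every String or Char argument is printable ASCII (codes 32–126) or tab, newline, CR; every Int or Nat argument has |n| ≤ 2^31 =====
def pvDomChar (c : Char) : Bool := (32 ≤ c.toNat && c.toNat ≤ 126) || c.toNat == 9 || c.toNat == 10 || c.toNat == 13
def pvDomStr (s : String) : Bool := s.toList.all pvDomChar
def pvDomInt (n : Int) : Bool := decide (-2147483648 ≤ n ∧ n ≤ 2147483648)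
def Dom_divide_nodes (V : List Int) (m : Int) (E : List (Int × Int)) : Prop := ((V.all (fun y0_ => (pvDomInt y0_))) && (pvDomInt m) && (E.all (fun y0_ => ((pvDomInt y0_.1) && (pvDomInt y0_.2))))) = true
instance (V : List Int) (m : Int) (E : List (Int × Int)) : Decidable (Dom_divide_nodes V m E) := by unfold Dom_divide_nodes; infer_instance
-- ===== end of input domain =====

-- B keeps per-class member sets and incrementally maintained internal-edge lists, so
-- a safety check scans only that class's internal edges instead of all of E (faster).
-- Both versions sort V in place; the claim is about the return value only.

-- ===== PORT A =====
def safety_condition (c : List Int) (v : Int) (E : List (Int × Int)) : Bool :=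
  match E with
  | [] => true
  | (w, z) :: rest =>
    if (c.contains w && c.contains z) && (w != v && z != v) then false
    else safety_condition c v rest

-- the inner 'for c in classes: … break' loop with its flag
def assignA (v : Int) (m : Int) (E : List (Int × Int)) :
    List (List Int) → List (List Int) × Bool
  | [] => ([], true)
  | c :: rest =>
    if safety_condition c v E && decide ((c.length : Int) < m) then
      ((c ++ [v]) :: rest, false)
    else
      let r := assignA v m E rest
      (c :: r.1, r.2)

def stepA (m : Int) (E : List (Int × Int)) (classes : List (List Int)) (v : Int) :
    List (List Int) :=
  let r := assignA v m E classes
  if r.2 then r.1 ++ [[v]] else r.1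

def divide_nodes (V : List Int) (m : Int) (E : List (Int × Int)) : List (List Int) :=
  (PySem.List.sorted V (fun x => x) false).foldl (stepA m E) []

-- ===== PORT B =====
-- per class: (members, member value set, internal edges of the class)
def altCheck (internal : List (Int × Int)) (v : Int) : Bool :=
  internal.all (fun p => p.1 == v || p.2 == v)

def newInternal (E : List (Int × Int)) (v : Int) (mset : PySem.Set Int) :
    List (Int × Int) :=
  E.filter (fun p => (p.1 == v && PySem.Set.contains mset p.2) ||
                     (p.2 == v && PySem.Set.contains mset p.1))

def assignB (v : Int) (m : Int) (E : List (Int × Int)) :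
    List (List Int × PySem.Set Int × List (Int × Int)) →
    List (List Int × PySem.Set Int × List (Int × Int)) × Bool
  | [] => ([], true)
  | (members, mset, internal) :: rest =>
    if decide ((members.length : Int) < m) && altCheck internal v then
      let e' :=
        if PySem.Set.contains mset v then (members ++ [v], mset, internal)
        else
          let mset' := PySem.Set.add mset v
          (members ++ [v], mset', internal ++ newInternal E v mset')
      (e' :: rest, false)
    else
      let r := assignB v m E rest
      ((members, mset, internal) :: r.1, r.2)

def stepB (m : Int) (E : List (Int × Int))
    (es : List (List Int × PySem.Set Int × List (Int × Int))) (v : Int) :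
    List (List Int × PySem.Set Int × List (Int × Int)) :=
  let r := assignB v m E es
  if r.2 then
    r.1 ++ [([v], PySem.Set.ofList [v], E.filter (fun p => p.1 == v && p.2 == v))]
  else r.1

def divide_nodes_alt (V : List Int) (m : Int) (E : List (Int × Int)) : List (List Int) :=
  ((PySem.List.sorted V (fun x => x) false).foldl (stepB m E) []).map (fun e => e.1)

-- ===== PRECONDITION & SPEC =====
def Spec_divide_nodes (V : List Int) (m : Int) (E : List (Int × Int)) (out : List (List Int)) : Prop := out = divide_nodes_alt V m E
instance (V : List Int) (m : Int) (E : List (Int × Int)) (out : List (List Int)) : Decidable (Spec_divide_nodes V m E out) := by unfold Spec_divide_nodes; infer_instance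

-- ===== CLAIM (what is proved, stated in full; the proofs are below) =====
def Claim_equal_divide_nodes : Prop := ∀ (V : List Int) (m : Int) (E : List (Int × Int)), Dom_divide_nodes V m E → Spec_divide_nodes V m E (divide_nodes V m E)

-- ===== LEMMAS AND PROOFS =====

-- invariant tying one of A's classes to one of B's entries
def EntryInv (E : List (Int × Int)) (c : List Int)
    (e : List Int × PySem.Set Int × List (Int × Int)) : Prop :=
  e.1 = c ∧ (∀ x : Int, x ∈ e.2.1 ↔ x ∈ c) ∧
  (∀ p : Int × Int, p ∈ e.2.2 ↔ p ∈ E ∧ p.1 ∈ c ∧ p.2 ∈ c)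

theorem safety_eq_all (c : List Int) (v : Int) (E : List (Int × Int)) :
    safety_condition c v E =
      E.all (fun p => !((c.contains p.1 && c.contains p.2) && (p.1 != v && p.2 != v))) := by
  induction E with
  | nil => rfl
  | cons hd tl ih =>
    obtain ⟨w, z⟩ := hd
    simp only [safety_condition, List.all_cons]
    cases hb : ((c.contains w && c.contains z) && (w != v && z != v)) with
    | true => simp
    | false => simp [ih]

theorem safety_iff (c : List Int) (v : Int) (E : List (Int × Int)) :
    safety_condition c v E = true ↔
      ∀ p : Int × Int, p ∈ E → p.1 ∈ c → p.2 ∈ c → p.1 = v ∨ p.2 = v := by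
  rw [safety_eq_all]
  simp only [List.all_eq_true, Bool.not_eq_eq_eq_not, Bool.not_true, Bool.and_eq_false_iff,
    bne_eq_false_iff_eq]
  constructor
  · intro h p hp h1 h2
    rcases h p hp with (h' | h') | h'
    · exact absurd h1 (by simpa using h')
    · exact absurd h2 (by simpa using h')
    · exact h'
  · intro h p hp
    by_cases h1 : p.1 ∈ c
    · by_cases h2 : p.2 ∈ c
      · exact Or.inr (h p hp h1 h2)
      · exact Or.inl (Or.inr (by simpa using h2))
    · exact Or.inl (Or.inl (by simpa using h1))

theorem altCheck_iff (internal : List (Int × Int)) (v : Int) :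
    altCheck internal v = true ↔ ∀ p ∈ internal, p.1 = v ∨ p.2 = v := by
  simp [altCheck]

theorem check_eq (E : List (Int × Int)) (c : List Int)
    (e : List Int × PySem.Set Int × List (Int × Int)) (h : EntryInv E c e) (v : Int) :
    altCheck e.2.2 v = safety_condition c v E := by
  rcases h with ⟨-, -, hint⟩
  by_cases hs : safety_condition c v E = true
  · rw [hs, altCheck_iff]
    rw [safety_iff] at hs
    intro p hp
    rcases (hint p).1 hp with ⟨hpE, h1, h2⟩
    exact hs p hpE h1 h2
  · rw [Bool.not_eq_true] at hs
    rw [hs, ← Bool.not_eq_true, altCheck_iff]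
    intro hall
    have := (safety_iff c v E).2 (fun p hpE h1 h2 => hall p ((hint p).2 ⟨hpE, h1, h2⟩))
    rw [hs] at this; cases this

-- adding v to a class preserves the invariant
theorem entryInv_add (E : List (Int × Int)) (c : List Int)
    (members : List Int) (mset : PySem.Set Int) (internal : List (Int × Int))
    (h : EntryInv E c (members, mset, internal)) (v : Int) :
    EntryInv E (c ++ [v])
      (if PySem.Set.contains mset v then (members ++ [v], mset, internal)
       else (members ++ [v], PySem.Set.add mset v,
             internal ++ newInternal E v (PySem.Set.add mset v))) := by
  rcases h with ⟨hm, hset, hint⟩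
  dsimp only at hm hset hint
  by_cases hv : PySem.Set.contains mset v
  · have hvc : v ∈ c := (hset v).1 ((PySem.Set.contains_iff _ _).1 hv)
    have hmm : ∀ x : Int, x ∈ c ++ [v] ↔ x ∈ c := by
      intro x
      simp only [List.mem_append, List.mem_singleton]
      constructor
      · rintro (h | rfl); exacts [h, hvc]
      · exact Or.inl
    simp only [hv, if_true]
    refine ⟨by simp [hm], ?_, ?_⟩
    · intro x; rw [hmm, hset]
    · intro p; rw [hint p, hmm, hmm]
  · simp only [hv]
    have hmem' : ∀ x : Int, x ∈ PySem.Set.add mset v ↔ x ∈ c ++ [v] := by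
      intro x
      rw [PySem.Set.mem_add]
      simp [hset]
    refine ⟨by simp [hm], hmem', ?_⟩
    intro p
    show p ∈ internal ++ newInternal E v (PySem.Set.add mset v) ↔ _
    have hcontains : ∀ x : Int, PySem.Set.contains (PySem.Set.add mset v) x = true ↔ x ∈ c ++ [v] := by
      intro x; rw [PySem.Set.contains_iff, hmem']
    simp only [List.mem_append, newInternal, List.mem_filter, hint p,
      Bool.or_eq_true, Bool.and_eq_true, beq_iff_eq, hcontains]
    simp only [List.mem_singleton]
    constructor
    · rintro (⟨hpE, h1, h2⟩ | ⟨hpE, hc⟩)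
      · exact ⟨hpE, Or.inl h1, Or.inl h2⟩
      · rcases hc with ⟨h1, h2⟩ | ⟨h2, h1⟩
        · exact ⟨hpE, Or.inr h1, h2⟩
        · exact ⟨hpE, h1, Or.inr h2⟩
    · rintro ⟨hpE, h1, h2⟩
      rcases h1 with h1 | h1
      · rcases h2 with h2 | h2
        · exact Or.inl ⟨hpE, h1, h2⟩
        · exact Or.inr ⟨hpE, Or.inr ⟨h2, Or.inl h1⟩⟩
      · exact Or.inr ⟨hpE, Or.inl ⟨h1, h2⟩⟩

theorem forall₂_append {α β : Type} {R : α → β → Prop} {l₁ : List α} {l₂ : List β}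
    {u₁ : List α} {u₂ : List β} (h : List.Forall₂ R l₁ l₂) (hu : List.Forall₂ R u₁ u₂) :
    List.Forall₂ R (l₁ ++ u₁) (l₂ ++ u₂) := by
  induction h with
  | nil => simpa
  | cons h _ ih => exact List.Forall₂.cons h ih

theorem assign_rel (E : List (Int × Int)) (v m : Int)
    (cs : List (List Int)) (es : List (List Int × PySem.Set Int × List (Int × Int)))
    (h : List.Forall₂ (EntryInv E) cs es) :
    List.Forall₂ (EntryInv E) (assignA v m E cs).1 (assignB v m E es).1 ∧
      (assignA v m E cs).2 = (assignB v m E es).2 := by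
  induction h with
  | nil => exact ⟨List.Forall₂.nil, rfl⟩
  | @cons c e cs' es' hce hrest ih =>
    obtain ⟨members, mset, internal⟩ := e
    have hmemlen : members.length = c.length := congrArg List.length hce.1
    have hcond : (safety_condition c v E && decide ((c.length : Int) < m)) =
        (decide ((members.length : Int) < m) && altCheck internal v) := by
      rw [check_eq E c _ hce v, hmemlen, Bool.and_comm]
    simp only [assignA, assignB, ← hcond]
    by_cases hc : (safety_condition c v E && decide ((c.length : Int) < m)) = true
    · simp only [hc, if_true]
      exact ⟨List.Forall₂.cons (entryInv_add E c members mset internal hce v) hrest, trivial⟩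
    · rw [Bool.not_eq_true] at hc
      simp only [hc, Bool.false_eq_true, if_false]
      exact ⟨List.Forall₂.cons hce ih.1, ih.2⟩

theorem step_rel (E : List (Int × Int)) (m v : Int)
    (cs : List (List Int)) (es : List (List Int × PySem.Set Int × List (Int × Int)))
    (h : List.Forall₂ (EntryInv E) cs es) :
    List.Forall₂ (EntryInv E) (stepA m E cs v) (stepB m E es v) := by
  obtain ⟨hrel, hflag⟩ := assign_rel E v m cs es h
  simp only [stepA, stepB, hflag]
  by_cases hf : (assignB v m E es).2 = true
  · simp only [hf, if_true]
    refine forall₂_append hrel (List.Forall₂.cons ?_ List.Forall₂.nil)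
    refine ⟨rfl, ?_, ?_⟩
    · intro x
      show x ∈ PySem.Set.ofList [v] ↔ _
      rw [PySem.Set.mem_ofList]
    · intro p
      show p ∈ E.filter (fun p => p.1 == v && p.2 == v) ↔ _
      simp only [List.mem_filter, Bool.and_eq_true, beq_iff_eq, List.mem_singleton]
  · rw [Bool.not_eq_true] at hf
    simp only [hf, Bool.false_eq_true, if_false]
    exact hrel

theorem foldl_rel (E : List (Int × Int)) (m : Int) (vs : List Int)
    (cs : List (List Int)) (es : List (List Int × PySem.Set Int × List (Int × Int)))
    (h : List.Forall₂ (EntryInv E) cs es) :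
    List.Forall₂ (EntryInv E) (vs.foldl (stepA m E) cs) (vs.foldl (stepB m E) es) := by
  induction vs generalizing cs es with
  | nil => exact h
  | cons v vs ih => exact ih _ _ (step_rel E m v cs es h)

theorem map_fst_of_rel (E : List (Int × Int)) {cs : List (List Int)}
    {es : List (List Int × PySem.Set Int × List (Int × Int))}
    (h : List.Forall₂ (EntryInv E) cs es) : es.map (fun e => e.1) = cs := by
  induction h with
  | nil => rfl
  | cons hce _ ih => simp only [List.map_cons, ih]; rw [hce.1]

-- ===== VERDICT (by name: the statement is the Claim_ definition above) =====
theorem divide_nodes_spec : Claim_equal_divide_nodes := by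
  intro V m E _
  unfold Spec_divide_nodes divide_nodes divide_nodes_alt
  exact (map_fst_of_rel E
    (foldl_rel E m (PySem.List.sorted V (fun x => x) false) [] [] List.Forall₂.nil)).symm
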